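-- pv_equiv track=rewrite | github.com/nobuki-takayama/contiguity | representative-2025-09-13/2025-07-07-lattice-base.py | list_sign_patterns
-- ===== SOURCE A (Python) =====
-- import itertools
--
-- def list_sign_patterns(v):
--     n=len(v)
--     if n==0: return []
--     non_zero=0;
--     for i in range(n):
--         if v[i]!=0: non_zero += 1
--     if non_zero==0:
--         sign=[[0]*n]
--     else:
--         sign=itertools.product(range(-1,2,2),repeat=non_zero)
--     ans=[]
--     for s in sign:
--         new_s=v.copy()
--         j=0;
--         for i in range(n):
--             if new_s[i]!=0:
--                 new_s[i] *= s[j]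
--                 j += 1
--         ans.append(new_s)
--     return ans
-- ===== SOURCE B (Python) =====
-- def list_sign_patterns(v):
--     if not v:
--         return []
--     return _expand(v)
--
-- def _expand(v):
--     if not v:
--         return [[]]
--     head = v[0]
--     rest = _expand(v[1:])
--     if head == 0:
--         return [[head] + r for r in rest]
--     return [[s] + r for s in (-head, head) for r in rest]
-- ===== Notes on version B (the rewrite author's own statement) =====
-- stated objective: simpler
-- what changed: Replaces the itertools.product enumeration plus the per-pattern j-aligned rewrite loop by a direct structural recursion that doubles the pattern list at each nonzero entry.
import Mathlib
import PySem

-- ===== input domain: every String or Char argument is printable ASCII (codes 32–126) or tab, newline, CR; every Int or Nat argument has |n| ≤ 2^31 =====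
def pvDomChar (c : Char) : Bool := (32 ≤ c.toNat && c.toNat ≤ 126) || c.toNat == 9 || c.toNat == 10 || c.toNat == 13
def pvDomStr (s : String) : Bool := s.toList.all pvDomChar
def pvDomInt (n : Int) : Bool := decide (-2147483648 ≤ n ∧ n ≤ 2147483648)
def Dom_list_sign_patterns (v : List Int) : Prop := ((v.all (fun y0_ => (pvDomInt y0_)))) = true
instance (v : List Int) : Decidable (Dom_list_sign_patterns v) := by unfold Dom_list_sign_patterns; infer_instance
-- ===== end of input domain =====

-- B replaces itertools.product + the j-aligned sign-application loop by a structural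
-- recursion doubling the list at each nonzero entry: simpler decomposition, same output.

-- ===== PORT A =====
-- the counting loop `for i in range(n): if v[i]!=0: non_zero += 1`
def pvCountNZ (v : List Int) (c : Nat) : Nat :=
  match v with
  | [] => c
  | a :: t => pvCountNZ t (if a ≠ 0 then c + 1 else c)

-- itertools.product(range(-1,2,2), repeat=k): all k-tuples over [-1,1], first factor slowest
def pvProdRep (k : Nat) : List (List Int) :=
  match k with
  | 0 => [[]]
  | k + 1 => ([(-1 : Int), 1]).flatMap (fun x => (pvProdRep k).map (fun s => x :: s))

-- the inner `for i in range(n)` loop: multiply each nonzero entry by the next sign s[j]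
-- (the `[]` case at a nonzero entry is unreachable in A: len(s) = non_zero)
def pvApplySigns (v : List Int) (s : List Int) : List Int :=
  match v, s with
  | [], _ => []
  | a :: t, s =>
    if a ≠ 0 then
      match s with
      | x :: s' => (a * x) :: pvApplySigns t s'
      | [] => a :: pvApplySigns t []
    else a :: pvApplySigns t s

def list_sign_patterns (v : List Int) : List (List Int) :=
  if v.length = 0 then []
  else
    let nz := pvCountNZ v 0
    let sign := if nz = 0 then [List.replicate v.length 0] else pvProdRep nz
    sign.map (fun s => pvApplySigns v s)

-- ===== PORT B =====
def pvExpand (v : List Int) : List (List Int) :=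
  match v with
  | [] => [[]]
  | a :: t =>
    let rest := pvExpand t
    if a = 0 then rest.map (fun r => a :: r)
    else ([-a, a]).flatMap (fun s => rest.map (fun r => s :: r))

def list_sign_patterns_alt (v : List Int) : List (List Int) :=
  if v.isEmpty then [] else pvExpand v

-- ===== PRECONDITION & SPEC =====
def Spec_list_sign_patterns (v : List Int) (out : List (List Int)) : Prop := out = list_sign_patterns_alt v
instance (v : List Int) (out : List (List Int)) : Decidable (Spec_list_sign_patterns v out) := by unfold Spec_list_sign_patterns; infer_instance

-- ===== CLAIM (what is proved, stated in full; the proofs are below) =====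
def Claim_equal_list_sign_patterns : Prop := ∀ (v : List Int), Dom_list_sign_patterns v → Spec_list_sign_patterns v (list_sign_patterns v)

-- ===== LEMMAS AND PROOFS =====

theorem pvCountNZ_shift (v : List Int) (c : Nat) : pvCountNZ v c = pvCountNZ v 0 + c := by
  induction v generalizing c with
  | nil => simp [pvCountNZ]
  | cons a t ih =>
    simp only [pvCountNZ]
    by_cases h : a = 0
    · simp [h, ih c]
    · simp [h, ih (0 + 1), ih (c + 1)]; omega

theorem pvApplySigns_allzero (v : List Int) (s : List Int) (h : pvCountNZ v 0 = 0) :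
    pvApplySigns v s = v := by
  induction v generalizing s with
  | nil => simp [pvApplySigns]
  | cons a t ih =>
    simp only [pvCountNZ] at h
    by_cases ha : a = 0
    · simp only [ha] at h ⊢
      simp [pvApplySigns, ih _ h]
    · rw [if_pos ha, pvCountNZ_shift] at h; omega

theorem pvMain (v : List Int) :
    (pvProdRep (pvCountNZ v 0)).map (fun s => pvApplySigns v s) = pvExpand v := by
  induction v with
  | nil => simp [pvCountNZ, pvProdRep, pvApplySigns, pvExpand]
  | cons a t ih =>
    by_cases ha : a = 0
    · have hc : pvCountNZ (a :: t) 0 = pvCountNZ t 0 := by simp [pvCountNZ, ha]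
      rw [hc]
      have : (fun s => pvApplySigns (a :: t) s) = (fun s => a :: pvApplySigns t s) := by
        funext s; simp [pvApplySigns, ha]
      rw [this, pvExpand, if_pos ha, ← ih, List.map_map]
      rfl
    · have hc : pvCountNZ (a :: t) 0 = pvCountNZ t 0 + 1 := by
        simp [pvCountNZ, ha, pvCountNZ_shift t 1]
      rw [hc, pvProdRep]
      simp only [List.flatMap_cons, List.flatMap_nil, List.append_nil, List.map_append,
        List.map_map]
      rw [pvExpand, if_neg ha]
      simp only [List.flatMap_cons, List.flatMap_nil, List.append_nil, ← ih, List.map_map]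
      congr 1
      · apply List.map_congr_left; intro s _
        simp [Function.comp, pvApplySigns, ha]
      · apply List.map_congr_left; intro s _
        simp [Function.comp, pvApplySigns, ha]

-- ===== VERDICT (by name: the statement is the Claim_ definition above) =====
theorem list_sign_patterns_spec : Claim_equal_list_sign_patterns := by
  intro v _
  show list_sign_patterns v = list_sign_patterns_alt v
  cases v with
  | nil => rfl
  | cons a t =>
    rw [list_sign_patterns, list_sign_patterns_alt]
    simp only [List.length_cons, List.isEmpty_cons, if_neg (by omega : ¬ t.length + 1 = 0),
      Bool.false_eq_true, if_neg (by simp : ¬ False)]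
    by_cases h : pvCountNZ (a :: t) 0 = 0
    · have h1 : pvExpand (a :: t) = [pvApplySigns (a :: t) []] := by
        rw [← pvMain, h]; rfl
      rw [h, h1, pvApplySigns_allzero _ [] h]
      simp [pvApplySigns_allzero _ _ h]
    · simp only [if_neg h]
      exact pvMain (a :: t)
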